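-- pv_equiv track=rewrite | github.com/ItsDrike/video-mapping | src/video_mapping/cli/pillar_choreography.py | _build_mirrored_pairs
-- ===== SOURCE A (Python) =====
-- def _build_mirrored_pairs(num_pillars: int) -> list[tuple[int, int]]:
--     pairs: list[tuple[int, int]] = []
--     left = 0
--     right = num_pillars - 1
--     while left < right:
--         pairs.append((left, right))
--         left += 1
--         right -= 1
--     if left == right:
--         pairs.append((left, right))
--     return pairs
-- ===== SOURCE B (Python) =====
-- def _build_mirrored_pairs(num_pillars: int) -> list[tuple[int, int]]:
--     # Build inside-out: start at the middle and walk outward, then reverse.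
--     pairs: list[tuple[int, int]] = []
--     if num_pillars > 0 and num_pillars % 2 == 1:
--         mid = (num_pillars - 1) // 2
--         pairs.append((mid, mid))
--     left = num_pillars // 2 - 1
--     right = num_pillars - num_pillars // 2
--     while left >= 0:
--         pairs.append((left, right))
--         left -= 1
--         right += 1
--     pairs.reverse()
--     return pairs
-- ===== Notes on version B (the rewrite author's own statement) =====
-- stated objective: alternative
-- what changed: Builds the pair list inside-out (middle element first, then cursors diverging outward from the centre) and reverses it at the end, instead of A's outside-in converging two-pointer loop with a trailing middle append.
import Mathlib
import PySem

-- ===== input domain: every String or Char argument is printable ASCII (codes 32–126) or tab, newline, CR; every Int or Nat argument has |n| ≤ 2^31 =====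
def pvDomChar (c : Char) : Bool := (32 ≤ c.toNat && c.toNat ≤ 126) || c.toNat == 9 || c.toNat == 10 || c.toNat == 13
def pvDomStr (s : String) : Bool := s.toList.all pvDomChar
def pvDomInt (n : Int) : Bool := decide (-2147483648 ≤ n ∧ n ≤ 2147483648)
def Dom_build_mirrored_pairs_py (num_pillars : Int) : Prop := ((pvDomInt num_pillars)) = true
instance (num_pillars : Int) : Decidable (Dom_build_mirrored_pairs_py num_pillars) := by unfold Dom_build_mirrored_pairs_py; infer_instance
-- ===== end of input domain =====

-- B builds the pair list inside-out (middle element first, cursors diverging outward) and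
-- reverses it at the end, instead of A's outside-in converging two-pointer loop.


-- ===== PORT A =====
-- the while-loop of A, carrying the accumulated pairs list and the two converging cursors
def buildMirroredLoop (pairs : List (Int × Int)) (left right : Int) : List (Int × Int) :=
  if _h : left < right then
    buildMirroredLoop (pairs ++ [(left, right)]) (left + 1) (right - 1)
  else if left = right then pairs ++ [(left, right)]
  else pairs
termination_by (right - left).toNat
decreasing_by omega

def build_mirrored_pairs_py (num_pillars : Int) : List (Int × Int) :=
  buildMirroredLoop [] 0 (num_pillars - 1)

-- ===== PORT B =====
-- the while-loop of B: cursors diverge outward from the centre, appending as they go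
def buildMirroredOutLoop (pairs : List (Int × Int)) (left right : Int) : List (Int × Int) :=
  if _h : 0 ≤ left then
    buildMirroredOutLoop (pairs ++ [(left, right)]) (left - 1) (right + 1)
  else pairs
termination_by (left + 1).toNat
decreasing_by omega

def build_mirrored_pairs_py_alt (num_pillars : Int) : List (Int × Int) :=
  let pairs : List (Int × Int) :=
    if 0 < num_pillars ∧ PySem.Int.mod num_pillars 2 = 1 then
      [(PySem.Int.floordiv (num_pillars - 1) 2, PySem.Int.floordiv (num_pillars - 1) 2)]
    else []
  (buildMirroredOutLoop pairs (PySem.Int.floordiv num_pillars 2 - 1)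
      (num_pillars - PySem.Int.floordiv num_pillars 2)).reverse

-- ===== PRECONDITION & SPEC =====
def Spec_build_mirrored_pairs_py (num_pillars : Int) (out : List (Int × Int)) : Prop := out = build_mirrored_pairs_py_alt num_pillars
instance (num_pillars : Int) (out : List (Int × Int)) : Decidable (Spec_build_mirrored_pairs_py num_pillars out) := by unfold Spec_build_mirrored_pairs_py; infer_instance

-- ===== CLAIM (what is proved, stated in full; the proofs are below) =====
def Claim_equal_build_mirrored_pairs_py : Prop := ∀ (num_pillars : Int), Dom_build_mirrored_pairs_py num_pillars → Spec_build_mirrored_pairs_py num_pillars (build_mirrored_pairs_py num_pillars)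

-- ===== LEMMAS AND PROOFS =====

-- A's loop: pairs (l+i, r-i) for i = 0 .. K-1, K = (r-l)/2 + 1 if l ≤ r else 0
theorem buildMirroredLoop_eq (m : Nat) :
    ∀ (l r : Int) (pairs : List (Int × Int)), (r - l).toNat ≤ m →
      buildMirroredLoop pairs l r =
        pairs ++ (List.range (if l ≤ r then ((r - l) / 2).toNat + 1 else 0)).map
          (fun (i : Nat) => ((l + i : Int), (r - i : Int))) := by
  induction m with
  | zero =>
    intro l r pairs hm
    rw [buildMirroredLoop]
    have hnl : ¬ l < r := by omega
    simp only [dif_neg hnl]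
    by_cases he : l = r
    · subst he; simp
    · have : ¬ l ≤ r := by omega
      simp [he, this]
  | succ m ih =>
    intro l r pairs hm
    rw [buildMirroredLoop]
    by_cases hlt : l < r
    · simp only [dif_pos hlt]
      rw [ih (l + 1) (r - 1) (pairs ++ [(l, r)]) (by omega)]
      rw [List.append_assoc]
      congr 1
      have hK : (if l ≤ r then ((r - l) / 2).toNat + 1 else 0)
          = (if l + 1 ≤ r - 1 then ((r - 1 - (l + 1)) / 2).toNat + 1 else 0) + 1 := by
        split_ifs <;> omega
      rw [hK, List.range_succ_eq_map, List.map_cons, List.map_map]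
      simp only [Nat.cast_zero, add_zero, sub_zero, List.singleton_append]
      congr 1
      apply List.map_congr_left
      intro i _
      simp only [Function.comp_apply, Prod.mk.injEq, Nat.succ_eq_add_one]
      push_cast
      omega
    · simp only [dif_neg hlt]
      by_cases he : l = r
      · subst he; simp
      · have : ¬ l ≤ r := by omega
        simp [he, this]

-- B's loop: pairs (l-i, r+i) for i = 0 .. (l+1)-1 (empty once l < 0)
theorem buildMirroredOutLoop_eq (m : Nat) :
    ∀ (l r : Int) (pairs : List (Int × Int)), (l + 1).toNat ≤ m →
      buildMirroredOutLoop pairs l r =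
        pairs ++ (List.range (l + 1).toNat).map
          (fun (i : Nat) => ((l - i : Int), (r + i : Int))) := by
  induction m with
  | zero =>
    intro l r pairs hm
    rw [buildMirroredOutLoop]
    have hnl : ¬ 0 ≤ l := by omega
    have hz : (l + 1).toNat = 0 := by omega
    simp [hnl, hz]
  | succ m ih =>
    intro l r pairs hm
    rw [buildMirroredOutLoop]
    by_cases hl : 0 ≤ l
    · simp only [dif_pos hl]
      rw [ih (l - 1) (r + 1) (pairs ++ [(l, r)]) (by omega)]
      rw [List.append_assoc]
      congr 1
      have hK : (l + 1).toNat = (l - 1 + 1).toNat + 1 := by omega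
      rw [hK, List.range_succ_eq_map, List.map_cons, List.map_map]
      simp only [Nat.cast_zero, sub_zero, add_zero, List.singleton_append]
      congr 1
      apply List.map_congr_left
      intro i _
      simp only [Function.comp_apply, Prod.mk.injEq]
      push_cast
      omega
    · simp only [dif_neg hl]
      have hz : (l + 1).toNat = 0 := by omega
      simp [hz]

-- reversing B's outward run turns it into the ascending-first-coordinate run
theorem outRun_reverse (l r : Int) :
    ((List.range (l + 1).toNat).map
        (fun (i : Nat) => ((l - i : Int), (r + i : Int)))).reverse
      = (List.range (l + 1).toNat).map
          (fun (i : Nat) => ((i : Int), (r + l - i : Int))) := by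
  apply List.ext_getElem
  · simp
  · intro j h1 h2
    simp only [List.length_reverse, List.length_map, List.length_range] at h1 h2
    simp only [List.getElem_reverse, List.getElem_map, List.getElem_range,
      List.length_map, List.length_range, Prod.mk.injEq]
    constructor <;> omega

-- ===== VERDICT (by name: the statement is the Claim_ definition above) =====
theorem build_mirrored_pairs_py_spec : Claim_equal_build_mirrored_pairs_py := by
  intro n _
  show build_mirrored_pairs_py n = build_mirrored_pairs_py_alt n
  unfold build_mirrored_pairs_py build_mirrored_pairs_py_alt
  rw [buildMirroredLoop_eq (n - 1 - 0).toNat 0 (n - 1) [] (le_refl _)]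
  dsimp only
  rw [PySem.Int.mod_eq_emod_of_pos (by omega), PySem.Int.floordiv_eq_ediv_of_pos (a := n - 1) (by omega),
    PySem.Int.floordiv_eq_ediv_of_pos (a := n) (by omega)]
  rw [buildMirroredOutLoop_eq (n / 2 - 1 + 1).toNat _ _ _ (le_refl _)]
  rw [List.reverse_append, outRun_reverse]
  simp only [List.nil_append, sub_zero, zero_add]
  by_cases hodd : 0 < n ∧ n % 2 = 1
  · simp only [if_pos hodd, List.reverse_singleton]
    have hK : (if (0:Int) ≤ n - 1 then ((n - 1) / 2).toNat + 1 else 0)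
        = (n / 2 - 1 + 1).toNat + 1 := by
      rcases hodd with ⟨h1, h2⟩
      split_ifs <;> omega
    rw [hK, List.range_succ, List.map_append]
    congr 1
    · apply List.map_congr_left
      intro i _
      simp only [Prod.mk.injEq]
      exact ⟨trivial, by omega⟩
    · simp only [List.map_cons, List.map_nil, List.cons.injEq, Prod.mk.injEq, and_true]
      rcases hodd with ⟨h1, h2⟩
      constructor <;> omega
  · simp only [if_neg hodd, List.reverse_nil, List.append_nil]
    have hK : (if (0:Int) ≤ n - 1 then ((n - 1) / 2).toNat + 1 else 0)
        = (n / 2 - 1 + 1).toNat := by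
      have h2 : ¬(0 < n) ∨ n % 2 ≠ 1 := by tauto
      rcases h2 with h | h <;> split_ifs <;> omega
    rw [hK]
    apply List.map_congr_left
    intro i _
    simp only [Prod.mk.injEq]
    exact ⟨trivial, by omega⟩
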